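-- pv_equiv track=rewrite | github.com/agustinissidoro/blendshapes | tests/stress_test.py | keyboard_axes
-- ===== SOURCE A (Python) =====
-- KEYBOARD_PATTERN_TICKS = (
--     (1, 0, 8),   # Hold X
--     (0, 0, 2),   # Release
--     (0, 1, 8),   # Hold Y
--     (0, 0, 2),   # Release
--     (1, 1, 8),   # Hold both
--     (0, 0, 4),   # Release
-- )
--
-- def keyboard_axes(player_idx, tick_idx):
--     total_ticks = sum(segment[2] for segment in KEYBOARD_PATTERN_TICKS)
--     player_offset_ticks = (player_idx - 1) * 6
--     position = (tick_idx + player_offset_ticks) % total_ticks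
--     for x_axis, y_axis, duration_ticks in KEYBOARD_PATTERN_TICKS:
--         if position < duration_ticks:
--             return x_axis, y_axis
--         position -= duration_ticks
--     return 0, 0
-- ===== SOURCE B (Python) =====
-- import bisect
--
-- _CUMULATIVE = [8, 10, 18, 20, 28, 32]
-- _AXES = [(1, 0), (0, 0), (0, 1), (0, 0), (1, 1), (0, 0)]
--
-- def keyboard_axes(player_idx, tick_idx):
--     position = (tick_idx + (player_idx - 1) * 6) % 32
--     return _AXES[bisect.bisect_right(_CUMULATIVE, position)]
-- ===== Notes on version B (the rewrite author's own statement) =====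
-- stated objective: idiomatic
-- what changed: Replaces A's decrement-and-scan loop over the pattern (and its per-call sum of durations) with a precomputed cumulative-boundary list and axes table and a bisect.bisect_right binary-search lookup.
import Mathlib
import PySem

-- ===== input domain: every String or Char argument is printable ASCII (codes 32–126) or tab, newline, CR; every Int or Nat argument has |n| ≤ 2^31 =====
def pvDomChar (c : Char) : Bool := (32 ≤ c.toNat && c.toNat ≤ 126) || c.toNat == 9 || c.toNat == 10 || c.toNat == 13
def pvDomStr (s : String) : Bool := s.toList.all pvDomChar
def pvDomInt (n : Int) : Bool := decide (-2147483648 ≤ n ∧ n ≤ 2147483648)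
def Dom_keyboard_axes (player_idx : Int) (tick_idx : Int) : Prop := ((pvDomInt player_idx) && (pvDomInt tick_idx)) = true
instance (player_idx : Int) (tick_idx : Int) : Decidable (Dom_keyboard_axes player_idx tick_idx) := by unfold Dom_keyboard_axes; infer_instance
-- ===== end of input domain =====

-- B replaces A's decrement-and-scan loop over the pattern by a binary search (bisect_right)
-- over precomputed cumulative tick boundaries and a parallel axes table (idiomatic; not faster).

-- ===== PORT A =====
-- KEYBOARD_PATTERN_TICKS
def keyboardPattern : List (Int × Int × Int) :=
  [(1, 0, 8), (0, 0, 2), (0, 1, 8), (0, 0, 2), (1, 1, 8), (0, 0, 4)]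

-- the for-loop: scan segments, returning when position < duration, else decrement
def keyboardScan : List (Int × Int × Int) → Int → Int × Int
  | [], _ => (0, 0)
  | (x, y, d) :: rest, pos => if pos < d then (x, y) else keyboardScan rest (pos - d)

def keyboard_axes (player_idx : Int) (tick_idx : Int) : Int × Int :=
  let total_ticks := keyboardPattern.foldl (fun s seg => s + seg.2.2) 0
  let player_offset_ticks := (player_idx - 1) * 6
  let position := PySem.Int.mod (tick_idx + player_offset_ticks) total_ticks
  keyboardScan keyboardPattern position

-- ===== PORT B =====
def cumulativeB : List Int := [8, 10, 18, 20, 28, 32]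
def axesB : List (Int × Int) := [(1, 0), (0, 0), (0, 1), (0, 0), (1, 1), (0, 0)]

-- bisect.bisect_right on a sorted list = number of elements ≤ position
def keyboard_axes_alt (player_idx : Int) (tick_idx : Int) : Int × Int :=
  let position := PySem.Int.mod (tick_idx + (player_idx - 1) * 6) 32
  let i := (cumulativeB.takeWhile (fun c => decide (c ≤ position))).length
  -- _AXES[i]: i ≤ 5 always (position < 32), so the index is in range
  (PySem.List.pyGet? axesB (i : Int)).getD (0, 0)

-- ===== PRECONDITION & SPEC =====
def Spec_keyboard_axes (player_idx : Int) (tick_idx : Int) (out : Int × Int) : Prop := out = keyboard_axes_alt player_idx tick_idx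
instance (player_idx : Int) (tick_idx : Int) (out : Int × Int) : Decidable (Spec_keyboard_axes player_idx tick_idx out) := by unfold Spec_keyboard_axes; infer_instance

-- ===== CLAIM (what is proved, stated in full; the proofs are below) =====
def Claim_equal_keyboard_axes : Prop := ∀ (player_idx : Int) (tick_idx : Int), Dom_keyboard_axes player_idx tick_idx → Spec_keyboard_axes player_idx tick_idx (keyboard_axes player_idx tick_idx)

-- ===== LEMMAS AND PROOFS =====

-- the two table readings agree on every residue 0 ≤ pos < 32
theorem scan_eq_lookup (pos : Int) (h0 : 0 ≤ pos) (h1 : pos < 32) :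
    keyboardScan keyboardPattern pos =
      (PySem.List.pyGet? axesB
        (((cumulativeB.takeWhile (fun c => decide (c ≤ pos))).length : Int))).getD (0, 0) := by
  interval_cases pos <;> decide

-- ===== VERDICT (by name: the statement is the Claim_ definition above) =====
theorem keyboard_axes_spec : Claim_equal_keyboard_axes := by
  intro p t _
  unfold Spec_keyboard_axes keyboard_axes keyboard_axes_alt
  have htot : keyboardPattern.foldl (fun s seg => s + seg.2.2) 0 = (32 : Int) := by decide
  rw [htot]
  exact scan_eq_lookup _ (PySem.Int.mod_nonneg _ (by norm_num)) (PySem.Int.mod_lt _ (by norm_num))
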